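-- pv_equiv track=rewrite | github.com/Thawat09/Inno | robot/app/utils/extract_utils.py | get_section_indices
-- ===== SOURCE A (Python) =====
-- def get_section_indices(lines, section_headers):
--     indices = {}
--     for i, line in enumerate(lines):
--         line_lower = line.lower().strip()
--         for key, header in section_headers.items():
--             if line_lower == header:
--                 indices[key] = i
--     return indices
-- ===== SOURCE B (Python) =====
-- def get_section_indices(lines, section_headers):
--     # Group the lines: last index of each distinct normalized line value,
--     # in first-occurrence order (dict order), then headers grouped by value.
--     span = {}
--     for i, line in enumerate(lines):
--         span[line.lower().strip()] = i
--     by_header = {}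
--     for key, header in section_headers.items():
--         by_header.setdefault(header, []).append(key)
--     indices = {}
--     for value, last in span.items():
--         for key in by_header.get(value, []):
--             indices[key] = last
--     return indices
-- ===== Notes on version B (the rewrite author's own statement) =====
-- stated objective: faster
-- what changed: B replaces A's nested line-by-header scan with a grouping pass: a dict records the last index of each distinct normalized line value (in first-occurrence order), header keys are grouped by value, and the result is assembled by walking the distinct values once.
import Mathlib
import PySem

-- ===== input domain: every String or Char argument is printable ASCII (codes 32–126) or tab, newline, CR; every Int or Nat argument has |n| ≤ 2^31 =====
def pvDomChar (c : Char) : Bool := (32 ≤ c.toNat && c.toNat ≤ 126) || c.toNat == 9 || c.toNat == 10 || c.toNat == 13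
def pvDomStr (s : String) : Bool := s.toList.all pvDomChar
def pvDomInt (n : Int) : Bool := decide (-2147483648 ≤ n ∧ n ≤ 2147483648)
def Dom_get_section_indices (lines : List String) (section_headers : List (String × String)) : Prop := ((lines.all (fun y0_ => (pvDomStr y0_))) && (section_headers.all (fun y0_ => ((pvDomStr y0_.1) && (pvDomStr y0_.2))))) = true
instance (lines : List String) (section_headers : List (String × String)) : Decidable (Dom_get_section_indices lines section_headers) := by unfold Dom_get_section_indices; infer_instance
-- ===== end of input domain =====

-- B groups the lines: one pass records the last index of each distinct normalized line value, header
-- keys are grouped by value, and the result is assembled over the distinct values in first-occurrence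
-- order — instead of A's nested line×header scan; objective: faster (no per-line scan over the headers).

-- ===== PORT A =====
def get_section_indices (lines : List String) (section_headers : List (String × String)) : List (String × Int) :=
  ((PySem.List.enumerate lines 0).foldl (fun indices iv =>
      let line_lower := PySem.Str.strip (PySem.Str.lower iv.2)
      section_headers.foldl (fun ind p => if line_lower == p.2 then ind.insert p.1 iv.1 else ind) indices)
    PySem.Dict.empty).items

-- ===== PORT B =====
def get_section_indices_alt (lines : List String) (section_headers : List (String × String)) : List (String × Int) :=
  -- span[line.lower().strip()] = i
  let span : PySem.Dict String Int :=
    (PySem.List.enumerate lines 0).foldl (fun d iv => d.insert (PySem.Str.strip (PySem.Str.lower iv.2)) iv.1)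
      PySem.Dict.empty
  -- by_header.setdefault(header, []).append(key)  ==  modify at header, default [], append key (exact)
  let by_header : PySem.Dict String (List String) :=
    section_headers.foldl (fun d p => d.modify p.2 [] (fun l => l ++ [p.1])) PySem.Dict.empty
  (span.items.foldl (fun indices vl =>
      (by_header.getD vl.1 []).foldl (fun ind k => ind.insert k vl.2) indices)
    PySem.Dict.empty).items

-- ===== PRECONDITION & SPEC =====
-- Pre_ requires the keys of section_headers to be distinct: section_headers is a Python dict, so its
-- assoc-list encoding never carries duplicate keys; no Python input is excluded.
def Pre_get_section_indices (lines : List String) (section_headers : List (String × String)) : Prop :=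
  (section_headers.map Prod.fst).Nodup
instance (lines : List String) (section_headers : List (String × String)) : Decidable (Pre_get_section_indices lines section_headers) := by unfold Pre_get_section_indices; infer_instance
def pvWitness_get_section_indices : List String × (List (String × String)) :=
  (["  Intro", "x", "INTRO"], [("intro", "intro"), ("body", "body")])
def Spec_get_section_indices (lines : List String) (section_headers : List (String × String)) (out : List (String × Int)) : Prop := out = get_section_indices_alt lines section_headers
instance (lines : List String) (section_headers : List (String × String)) (out : List (String × Int)) : Decidable (Spec_get_section_indices lines section_headers out) := by unfold Spec_get_section_indices; infer_instance

-- ===== CLAIM (what is proved, stated in full; the proofs are below) =====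
def Claim_equal_get_section_indices : Prop := ∀ (lines : List String) (section_headers : List (String × String)), Dom_get_section_indices lines section_headers → Pre_get_section_indices lines section_headers → Spec_get_section_indices lines section_headers (get_section_indices lines section_headers)

-- ===== LEMMAS AND PROOFS =====

-- the keys of section_headers whose header value is v, in order
def pvKeysOf (sh : List (String × String)) (v : String) : List String :=
  (sh.filter (fun p => p.2 == v)).map (·.1)

theorem pvKeysOf_nodup (sh : List (String × String)) (hnd : (sh.map Prod.fst).Nodup) (v : String) :
    (pvKeysOf sh v).Nodup :=
  hnd.sublist (List.Sublist.map Prod.fst (List.filter_sublist (l := sh)))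

theorem pvKeysOf_disj (sh : List (String × String)) (hnd : (sh.map Prod.fst).Nodup)
    {v w : String} {k : String} (hv : k ∈ pvKeysOf sh v) (hw : k ∈ pvKeysOf sh w) : v = w := by
  unfold pvKeysOf at hv hw
  obtain ⟨p, hp, hpk⟩ := List.mem_map.1 hv
  obtain ⟨q, hq, hqk⟩ := List.mem_map.1 hw
  have hpm : p ∈ sh := (List.mem_filter.1 hp).1
  have hqm : q ∈ sh := (List.mem_filter.1 hq).1
  have hpv : p.2 = v := by simpa using (List.mem_filter.1 hp).2
  have hqw : q.2 = w := by simpa using (List.mem_filter.1 hq).2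
  have : p = q := List.inj_on_of_nodup_map hnd hpm hqm (by rw [hpk, hqk])
  rw [← hpv, ← hqw, this]

theorem pv_flatMap_congr {α β : Type} (l : List α) (f g : α → List β)
    (h : ∀ v ∈ l, f v = g v) : l.flatMap f = l.flatMap g := by
  induction l with
  | nil => rfl
  | cons x t ih =>
    simp only [List.flatMap_cons]
    rw [h x (by simp), ih (fun v hv => h v (by simp [hv]))]

-- a dict whose items are per-value key groups contains exactly the grouped keys
theorem pv_contains_flat (sh : List (String × String)) {d : PySem.Dict String Int}
    {V : List String} {g : String → Int}
    (hitems : d.items = V.flatMap (fun v => (pvKeysOf sh v).map (fun k => (k, g v)))) (k : String) :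
    d.contains k = true ↔ ∃ v ∈ V, k ∈ pvKeysOf sh v := by
  rw [PySem.Dict.contains_iff_mem_keys]
  simp [PySem.Dict.keys, hitems, List.map_flatMap, List.map_map, Function.comp_def]

-- A's inner scan over section_headers inserts exactly the matching keys, in order
theorem pv_inner_scan (sh : List (String × String)) (L : String) (i : Int)
    (d : PySem.Dict String Int) :
    sh.foldl (fun ind p => if L == p.2 then ind.insert p.1 i else ind) d
      = (pvKeysOf sh L).foldl (fun ind k => ind.insert k i) d := by
  induction sh generalizing d with
  | nil => rfl
  | cons p t ih =>
    simp only [List.foldl_cons, pvKeysOf, List.filter_cons]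
    by_cases h : p.2 = L
    · subst h
      simp only [beq_self_eq_true, if_true, List.map_cons, List.foldl_cons]
      exact ih _
    · have h1 : (L == p.2) = false := by simp [Ne.symm h]
      have h2 : (p.2 == L) = false := by simp [h]
      simp only [h1, h2, Bool.false_eq_true, if_false]
      exact ih _

-- B's grouping of keys by header, looked up at v, yields exactly pvKeysOf sh v
theorem pv_by_header_getD (sh : List (String × String)) (v : String) :
    (sh.foldl (fun d p => d.modify p.2 [] (fun l => l ++ [p.1])) PySem.Dict.empty).getD v []
      = pvKeysOf sh v := by
  have h : sh.foldl (fun d p => d.modify p.2 [] (fun l => l ++ [p.1])) PySem.Dict.empty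
      = (sh.map (fun p => (p.2, p.1))).foldl (fun d q => d.modify q.1 [] (fun l => l ++ [q.2])) PySem.Dict.empty := by
    rw [List.foldl_map]
  rw [h, PySem.Dict.getD_foldl_modify_append]
  simp [pvKeysOf, List.filter_map, Function.comp_def]

-- last index carried at v by a list of (value, index) pairs
def pvLast (L : List (String × Int)) (v : String) : Int :=
  L.foldl (fun a p => if p.1 = v then p.2 else a) 0

-- the span dict looks up the last index of each value
theorem pv_span_getD (L : List (String × Int)) (d : PySem.Dict String Int) (v : String) :
    (L.foldl (fun d p => d.insert p.1 p.2) d).getD v 0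
      = L.foldl (fun a p => if p.1 = v then p.2 else a) (d.getD v 0) := by
  induction L generalizing d with
  | nil => rfl
  | cons p t ih =>
    simp only [List.foldl_cons, ih]
    by_cases h : p.1 = v
    · simp [PySem.Dict.getD_insert, h]
    · simp [PySem.Dict.getD_insert, h, Ne.symm h]

theorem pv_dedup_append_singleton {α : Type} [BEq α] [LawfulBEq α] (xs : List α) (x : α) :
    PySem.List.dedup (xs ++ [x]) = if x ∈ xs then PySem.List.dedup xs else PySem.List.dedup xs ++ [x] := by
  simp only [PySem.List.dedup_eq_ofList, PySem.Set.ofList_eq_foldl, List.foldl_append, List.foldl_cons, List.foldl_nil]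
  rw [← PySem.Set.ofList_eq_foldl]
  unfold PySem.Set.add
  by_cases h : x ∈ xs
  · simp [PySem.Set.contains, PySem.Set.mem_ofList, h]
  · simp [PySem.Set.contains, PySem.Set.mem_ofList, h]

-- inserting a block of already-present keys updates the items in place
theorem pv_upd_items (ks : List String) (i : Int) (d : PySem.Dict String Int)
    (hc : ∀ k ∈ ks, d.contains k = true) :
    (ks.foldl (fun d k => d.insert k i) d).items
      = d.items.map (fun p => if p.1 ∈ ks then (p.1, i) else p) := by
  induction ks generalizing d with
  | nil => simp
  | cons k t ih =>
    simp only [List.foldl_cons]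
    rw [ih _ (fun k' hk' => by
      rw [PySem.Dict.contains_insert]
      simp [hc k' (List.mem_cons_of_mem _ hk')])]
    rw [PySem.Dict.items_insert_of_contains _ _ (hc k (List.mem_cons_self))]
    rw [List.map_map]
    apply List.map_congr_left
    intro p _
    by_cases h1 : p.1 = k
    · by_cases h2 : k ∈ t <;> simp [h1, h2]
    · have hb : (p.1 == k) = false := by simp [h1]
      by_cases h2 : p.1 ∈ t <;> simp [h1, h2]

-- fold of the per-value insert blocks over distinct values appends the groups
theorem pv_B_items (sh : List (String × String)) (hnd : (sh.map Prod.fst).Nodup)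
    (g : String → Int) (V : List String) (hV : V.Nodup) :
    (V.foldl (fun ind v => (pvKeysOf sh v).foldl (fun d k => d.insert k (g v)) ind) PySem.Dict.empty).items
      = V.flatMap (fun v => (pvKeysOf sh v).map (fun k => (k, g v))) := by
  induction V using List.reverseRecOn with
  | nil => rfl
  | append_singleton V v ih =>
    have hVn : V.Nodup := hV.sublist (List.sublist_append_left _ _)
    have hvV : v ∉ V := by
      have h' : (v :: V).Nodup := List.nodup_append_comm.1 hV
      exact (List.nodup_cons.1 h').1
    rw [List.foldl_append, List.foldl_cons, List.foldl_nil, List.flatMap_append]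
    have hitems := ih hVn
    have hfresh : ∀ k ∈ pvKeysOf sh v,
        (V.foldl (fun ind v => (pvKeysOf sh v).foldl (fun d k => d.insert k (g v)) ind) PySem.Dict.empty).contains k = false := by
      intro k hk
      rcases hb : (V.foldl (fun ind v => (pvKeysOf sh v).foldl (fun d k => d.insert k (g v)) ind) PySem.Dict.empty).contains k with _ | _
      · exact hb
      · exfalso
        obtain ⟨w, hwV, hkw⟩ := (pv_contains_flat sh hitems k).1 hb
        exact hvV ((pvKeysOf_disj sh hnd hk hkw) ▸ hwV)
    rw [PySem.Dict.items_foldl_insert_fresh (k := fun a => a) (v := fun _ => g v) _ _ hfresh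
      (by simpa using pvKeysOf_nodup sh hnd v)]
    rw [hitems]
    simp

-- A's line-major fold, characterised: distinct values in first-occurrence order,
-- each contributing its keys with the last matching index
theorem pv_A_items (sh : List (String × String)) (hnd : (sh.map Prod.fst).Nodup)
    (L : List (String × Int)) :
    (L.foldl (fun ind p => (pvKeysOf sh p.1).foldl (fun d k => d.insert k p.2) ind) PySem.Dict.empty).items
      = (PySem.List.dedup (L.map Prod.fst)).flatMap
          (fun v => (pvKeysOf sh v).map (fun k => (k, pvLast L v))) := by
  induction L using List.reverseRecOn with
  | nil => rfl
  | append_singleton L q ih =>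
    rw [List.foldl_append, List.foldl_cons, List.foldl_nil, List.map_append]
    have hlast : ∀ w, pvLast (L ++ [q]) w = if q.1 = w then q.2 else pvLast L w := by
      intro w; unfold pvLast; rw [List.foldl_append]; simp
    rw [List.map_cons, List.map_nil, pv_dedup_append_singleton]
    by_cases hmem : q.1 ∈ L.map Prod.fst
    · -- q.1 seen before: in-place update of its group
      simp only [hmem, if_true]
      have hcont : ∀ k ∈ pvKeysOf sh q.1,
          (L.foldl (fun ind p => (pvKeysOf sh p.1).foldl (fun d k => d.insert k p.2) ind) PySem.Dict.empty).contains k = true := by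
        intro k hk
        exact (pv_contains_flat sh ih k).2 ⟨q.1, (PySem.List.mem_dedup _ _).2 hmem, hk⟩
      rw [pv_upd_items _ _ _ hcont, ih, List.map_flatMap]
      apply pv_flatMap_congr
      intro v hv
      rw [List.map_map]
      apply List.map_congr_left
      intro k hk
      by_cases hqv : q.1 = v
      · subst hqv
        simp [hk, hlast]
      · have hknot : k ∉ pvKeysOf sh q.1 := fun hk' => hqv (pvKeysOf_disj sh hnd hk' hk)
        simp [hknot, hlast, hqv]
    · -- q.1 fresh: its group is appended
      simp only [hmem, if_false]
      have hfresh : ∀ k ∈ pvKeysOf sh q.1,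
          (L.foldl (fun ind p => (pvKeysOf sh p.1).foldl (fun d k => d.insert k p.2) ind) PySem.Dict.empty).contains k = false := by
        intro k hk
        rcases hb : (L.foldl (fun ind p => (pvKeysOf sh p.1).foldl (fun d k => d.insert k p.2) ind) PySem.Dict.empty).contains k with _ | _
        · exact hb
        · exfalso
          obtain ⟨w, hwV, hkw⟩ := (pv_contains_flat sh ih k).1 hb
          exact hmem ((pvKeysOf_disj sh hnd hk hkw) ▸ ((PySem.List.mem_dedup _ _).1 hwV))
      rw [PySem.Dict.items_foldl_insert_fresh (k := fun a => a) (v := fun _ => q.2) _ _ hfresh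
        (by simpa using pvKeysOf_nodup sh hnd q.1), ih, List.flatMap_append]
      have h1 : (PySem.List.dedup (L.map Prod.fst)).flatMap (fun v => (pvKeysOf sh v).map (fun k => (k, pvLast L v)))
          = (PySem.List.dedup (L.map Prod.fst)).flatMap (fun v => (pvKeysOf sh v).map (fun k => (k, pvLast (L ++ [q]) v))) := by
        apply pv_flatMap_congr
        intro v hv
        have hqv : q.1 ≠ v := fun h => hmem (h ▸ (PySem.List.mem_dedup _ _).1 hv)
        rw [hlast v, if_neg hqv]
      rw [h1]
      simp [hlast]

-- ===== VERDICT (by name: the statement is the Claim_ definition above) =====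
theorem get_section_indices_spec : Claim_equal_get_section_indices := by
  intro lines sh _ hnd
  unfold Spec_get_section_indices get_section_indices get_section_indices_alt
  -- A's fold = canonical fold over the (normalized value, index) pairs
  have hA : (PySem.List.enumerate lines 0).foldl (fun indices iv =>
        let line_lower := PySem.Str.strip (PySem.Str.lower iv.2)
        sh.foldl (fun ind p => if line_lower == p.2 then ind.insert p.1 iv.1 else ind) indices)
        PySem.Dict.empty
      = ((PySem.List.enumerate lines 0).map (fun iv => (PySem.Str.strip (PySem.Str.lower iv.2), iv.1))).foldl
          (fun ind p => (pvKeysOf sh p.1).foldl (fun d k => d.insert k p.2) ind) PySem.Dict.empty := by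
    rw [List.foldl_map]
    congr 1
    funext ind iv
    exact pv_inner_scan sh _ iv.1 ind
  -- the span dict: items are the distinct values with their last index
  have hspankeys : ((PySem.List.enumerate lines 0).foldl
        (fun d iv => d.insert (PySem.Str.strip (PySem.Str.lower iv.2)) iv.1) PySem.Dict.empty).keys
      = PySem.List.dedup (((PySem.List.enumerate lines 0).map (fun iv => (PySem.Str.strip (PySem.Str.lower iv.2), iv.1))).map Prod.fst) := by
    rw [PySem.Dict.keys_foldl_insert_key (key := fun iv : Int × String => PySem.Str.strip (PySem.Str.lower iv.2)) (f := fun _ iv => iv.1)]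
    simp [PySem.Set.update, PySem.List.dedup_eq_ofList, PySem.Set.ofList_eq_foldl, List.map_map, Function.comp_def]
  have hspan : ((PySem.List.enumerate lines 0).foldl
        (fun d iv => d.insert (PySem.Str.strip (PySem.Str.lower iv.2)) iv.1) PySem.Dict.empty).items
      = (PySem.List.dedup (((PySem.List.enumerate lines 0).map (fun iv => (PySem.Str.strip (PySem.Str.lower iv.2), iv.1))).map Prod.fst)).map
          (fun v => (v, pvLast ((PySem.List.enumerate lines 0).map (fun iv => (PySem.Str.strip (PySem.Str.lower iv.2), iv.1))) v)) := by
    rw [PySem.Dict.items_eq_map_keys _ (by rw [hspankeys]; exact PySem.List.nodup_dedup _) 0, hspankeys]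
    apply List.map_congr_left
    intro v _
    have hgd : ((PySem.List.enumerate lines 0).foldl
          (fun d iv => d.insert (PySem.Str.strip (PySem.Str.lower iv.2)) iv.1) PySem.Dict.empty).getD v 0
        = pvLast ((PySem.List.enumerate lines 0).map (fun iv => (PySem.Str.strip (PySem.Str.lower iv.2), iv.1))) v := by
      have : (PySem.List.enumerate lines 0).foldl
            (fun d iv => d.insert (PySem.Str.strip (PySem.Str.lower iv.2)) iv.1) PySem.Dict.empty
          = ((PySem.List.enumerate lines 0).map (fun iv => (PySem.Str.strip (PySem.Str.lower iv.2), iv.1))).foldl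
              (fun d p => d.insert p.1 p.2) PySem.Dict.empty := by rw [List.foldl_map]
      rw [this, pv_span_getD]
      unfold pvLast
      rw [PySem.Dict.getD_empty]
    rw [hgd]
  simp only []
  rw [hA, hspan, pv_A_items sh hnd]
  -- B's outer fold: rewrite the by_header lookup, then fold over the mapped span items
  have hB : ∀ (it : List (String × Int)),
      (it.foldl (fun indices vl =>
          ((sh.foldl (fun d p => d.modify p.2 [] (fun l => l ++ [p.1])) PySem.Dict.empty).getD vl.1 []).foldl
            (fun ind k => ind.insert k vl.2) indices) PySem.Dict.empty)
        = it.foldl (fun indices vl => (pvKeysOf sh vl.1).foldl (fun ind k => ind.insert k vl.2) indices) PySem.Dict.empty := by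
    intro it
    congr 1
    funext indices vl
    rw [pv_by_header_getD]
  rw [hB, List.foldl_map]
  rw [pv_B_items sh hnd _ _ (PySem.List.nodup_dedup _)]
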